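-- pv_equiv track=rewrite | github.com/mohit-rathee/code | gfg/reverseString.py | removeReverse
-- ===== SOURCE A (Python) =====
-- def removeReverse(S):
--     L=len(S)
--     D=True
--     start=True
--     while D:
--         newstr=remRev(S,L,start)
--         S=newstr[0]
--         D=newstr[1]
--         start=not start
--         L-=1
--     if start:
--         return S[::-1]
--     return S
--
-- def remRev(S,L,start):
--     if start:
--         for i in range(L):
--             for j in range(L-1,i,-1):
--                 if S[i]==S[j]:
--                     return S[:i]+S[i+1:], True
--         return S,False
--     else:
--         for i in range(L-1,-1,-1):
--             for j in range(i):
--                 if S[i]==S[j]: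
--                     return S[:i]+S[i+1:], True
--         return S,False
-- ===== SOURCE B (Python) =====
-- def removeReverse(S):
--     # Per round, build an occurrence index once (last/first occurrence dict),
--     # so finding the removal position is one O(1)-lookup scan instead of a nested scan.
--     removals = 0
--     left = True
--     while True:
--         if left:
--             last = {}
--             for i, ch in enumerate(S):
--                 last[ch] = i
--             idx = next((i for i, ch in enumerate(S) if last[ch] > i), None)
--         else:
--             first = {}
--             for i, ch in enumerate(S):
--                 if ch not in first:
--                     first[ch] = i
--             idx = next((i for i in range(len(S) - 1, -1, -1) if first[S[i]] < i), None)
--         if idx is None: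
--             break
--         S = S[:idx] + S[idx + 1:]
--         left = not left
--         removals += 1
--     return S[::-1] if removals % 2 else S
-- ===== Notes on version B (the rewrite author's own statement) =====
-- stated objective: alternative
-- what changed: Each removal round now builds a last-/first-occurrence dictionary of the current string in one pass and finds the character to delete with a single scan of O(1) lookups, replacing A's nested index-pair scan; the alternating left/right removal loop and the final parity-based reversal are kept, with the reversal decided by a removal counter instead of A's toggled flag.
import Mathlib
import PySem

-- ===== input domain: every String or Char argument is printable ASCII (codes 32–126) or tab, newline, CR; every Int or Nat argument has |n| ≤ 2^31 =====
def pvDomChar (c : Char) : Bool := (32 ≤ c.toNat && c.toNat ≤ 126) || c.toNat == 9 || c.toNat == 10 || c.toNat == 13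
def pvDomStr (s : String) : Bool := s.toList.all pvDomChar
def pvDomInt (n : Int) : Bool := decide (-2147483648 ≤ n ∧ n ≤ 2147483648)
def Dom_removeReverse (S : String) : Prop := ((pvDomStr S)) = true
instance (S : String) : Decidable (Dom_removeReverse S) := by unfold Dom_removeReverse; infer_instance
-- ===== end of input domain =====

-- B replaces A's nested duplicate scan per round by one occurrence-index (dict) pass per round
-- (objective: alternative; O(n^2) worst case instead of O(n^3); not measured faster on random inputs).

-- ===== PORT A =====
-- Strings are handled as their character lists (PySem convention).
-- A's remRev: the double search loop returns at the FIRST hit; ported as find? of an inner any.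
-- All indices fed to pyGet? lie in range whenever L = len S (the only way A calls it), where
-- Option equality (==) coincides with Python's char equality, so the port is exact there.
def findA_left (S : List Char) (L : Int) : Option Int :=
  (PySem.List.pyRange 0 L 1).find? (fun i =>
    (PySem.List.pyRange (L - 1) i (-1)).any (fun j => PySem.List.pyGet? S i == PySem.List.pyGet? S j))

def findA_right (S : List Char) (L : Int) : Option Int :=
  (PySem.List.pyRange (L - 1) (-1) (-1)).find? (fun i =>
    (PySem.List.pyRange 0 i 1).any (fun j => PySem.List.pyGet? S i == PySem.List.pyGet? S j))

-- remRev(S, L, start): (new string, did-remove)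
def remRevA (S : List Char) (L : Int) (start : Bool) : List Char × Bool :=
  match (if start then findA_left S L else findA_right S L) with
  | some i => (PySem.List.slice S none (some i) ++ PySem.List.slice S (some (i + 1)) none, true)
  | none   => (S, false)

-- A's while loop; the fuel (length + 1 at the call site) only makes the recursion structural:
-- each successful round shortens S by one, so the fuel is never exhausted.
def loopA : Nat → List Char → Int → Bool → List Char × Bool
  | 0, S, _, start => (S, start)
  | f + 1, S, L, start =>
      let r := remRevA S L start
      if r.2 then loopA f r.1 (L - 1) (!start) else (r.1, !start)

def removeReverse (S : String) : String :=
  let l := S.toList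
  let r := loopA (l.length + 1) l (l.length : Int) true
  if r.2 then String.ofList r.1.reverse else String.ofList r.1

-- ===== PORT B =====
-- Source B: per round, build the last-/first-occurrence dict in one pass, then one scan with O(1) lookups.
-- last[ch] / first[S[i]] lookups always hit (ch occurs in S); ported by getD (the default is never read).
def lastOccB (S : List Char) : PySem.Dict Char Int :=
  (PySem.List.enumerate S 0).foldl (fun d p => d.insert p.2 p.1) PySem.Dict.empty

def firstOccB (S : List Char) : PySem.Dict Char Int :=
  (PySem.List.enumerate S 0).foldl (fun d p => if d.contains p.2 then d else d.insert p.2 p.1)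
    PySem.Dict.empty

def findB_left (S : List Char) : Option Int :=
  ((PySem.List.enumerate S 0).find? (fun p => (lastOccB S).getD p.2 0 > p.1)).map (·.1)

def findB_right (S : List Char) : Option Int :=
  (PySem.List.pyRange ((S.length : Int) - 1) (-1) (-1)).find? (fun i =>
    (firstOccB S).getD (PySem.List.pyGetD S i ' ') 0 < i)

-- Source B's while loop, same fuel device as loopA; returns (string, removals).
def loopB : Nat → List Char → Bool → Int → List Char × Int
  | 0, S, _, rem => (S, rem)
  | f + 1, S, left, rem =>
      match (if left then findB_left S else findB_right S) with
      | none => (S, rem)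
      | some idx =>
          loopB f (PySem.List.slice S none (some idx) ++ PySem.List.slice S (some (idx + 1)) none)
            (!left) (rem + 1)

def removeReverse_alt (S : String) : String :=
  let l := S.toList
  let r := loopB (l.length + 1) l true 0
  if PySem.Int.mod r.2 2 == 1 then String.ofList r.1.reverse else String.ofList r.1

-- ===== PRECONDITION & SPEC =====
def Spec_removeReverse (S : String) (out : String) : Prop := out = removeReverse_alt S
instance (S : String) (out : String) : Decidable (Spec_removeReverse S out) := by unfold Spec_removeReverse; infer_instance

-- ===== CLAIM (what is proved, stated in full; the proofs are below) =====
def Claim_equal_removeReverse : Prop := ∀ (S : String), Dom_removeReverse S → Spec_removeReverse S (removeReverse S)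

-- ===== LEMMAS AND PROOFS =====

theorem find?_congr_mem {α : Type} (l : List α) (p q : α → Bool)
    (h : ∀ x ∈ l, p x = q x) : l.find? p = l.find? q := by
  induction l with
  | nil => rfl
  | cons a t ih =>
    simp only [List.find?]
    rw [h a (List.mem_cons_self ..)]
    cases q a
    · exact ih fun x hx => h x (List.mem_cons_of_mem _ hx)
    · rfl

-- the dict built by Source B's last-occurrence loop maps c to its LAST index in S
theorem lastOccB_append (S : List Char) (x : Char) :
    lastOccB (S ++ [x]) = (lastOccB S).insert x (S.length : Int) := by
  unfold lastOccB
  rw [PySem.List.enumerate_append]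
  simp [PySem.List.enumerate_cons, PySem.List.enumerate_nil]

theorem lastOccB_spec (S : List Char) (c : Char) (hc : c ∈ S) :
    ∃ (m : Nat) (hm : m < S.length), S[m] = c ∧ (lastOccB S).get? c = some (m : Int) ∧
      ∀ (k : Nat) (hk : k < S.length), m < k → S[k] ≠ c := by
  induction S using List.reverseRecOn with
  | nil => simp at hc
  | append_singleton T x ih =>
    rw [lastOccB_append]
    by_cases hcx : c = x
    · subst hcx
      refine ⟨T.length, by simp, by simp, ?_, ?_⟩
      · simp [PySem.Dict.get?_insert_self]
      · intro k hk hgt; simp at hk; omega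
    · have hcT : c ∈ T := by
        rcases List.mem_append.1 hc with h | h
        · exact h
        · simp at h; exact absurd h hcx
      obtain ⟨m, hm, hSm, hget, hlast⟩ := ih hcT
      refine ⟨m, by simp; omega, ?_, ?_, ?_⟩
      · rw [List.getElem_append_left hm]; exact hSm
      · rw [PySem.Dict.get?_insert_of_ne _ _ hcx]; exact hget
      · intro k hk hgt
        by_cases hkT : k < T.length
        · rw [List.getElem_append_left hkT]; exact hlast k hkT hgt
        · have hke : k = T.length := by simp at hk; omega
          subst hke
          simp only [List.getElem_concat_length]
          exact fun h => hcx h.symm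

-- the dict built by Source B's first-occurrence loop maps c to its FIRST index in S
theorem firstFold_get? (S : List Char) : ∀ (s : Int) (d : PySem.Dict Char Int) (c : Char),
    ((PySem.List.enumerate S s).foldl
        (fun d p => if d.contains p.2 then d else d.insert p.2 p.1) d).get? c
      = if d.contains c then d.get? c
        else (PySem.List.index? S c).map (fun k => s + (k : Int)) := by
  induction S with
  | nil =>
    intro s d c
    simp only [PySem.List.enumerate_nil, List.foldl_nil, PySem.List.index?_eq_idxOf?,
      List.idxOf?_nil]
    split_ifs with h
    · rfl
    · exact (PySem.Dict.get?_eq_none_iff_contains _ _).2 (by simp [h])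
  | cons a T ih =>
    intro s d c
    rw [PySem.List.enumerate_cons, List.foldl_cons, ih]
    by_cases hca : c = a
    · subst hca
      by_cases hda : d.contains c
      · simp [hda]
      · rw [if_neg hda]
        rw [if_pos (PySem.Dict.contains_insert_self d c s), PySem.Dict.get?_insert_self]
        rw [if_neg hda, PySem.List.index?_cons_self]
        simp
    · have hne : c ≠ a := hca
      have hcont : (if d.contains a then d else d.insert a s).contains c = d.contains c := by
        split_ifs with h
        · rfl
        · rw [PySem.Dict.contains_insert]
          simp [hne]
      have hget : (if d.contains a then d else d.insert a s).get? c = d.get? c := by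
        split_ifs with h
        · rfl
        · exact PySem.Dict.get?_insert_of_ne _ _ hne
      rw [hcont, hget]
      by_cases hdc : d.contains c
      · simp [hdc]
      · rw [if_neg (by simp [hdc]), if_neg (by simp [hdc])]
        rw [PySem.List.index?_cons_of_ne _ (fun h => hne h.symm)]
        cases PySem.List.index? T c with
        | none => rfl
        | some k =>
          simp
          omega
 
theorem firstOccB_spec (S : List Char) (c : Char) (hc : c ∈ S) :
    ∃ (m : Nat) (hm : m < S.length), S[m] = c ∧ (firstOccB S).get? c = some (m : Int) ∧
      ∀ (k : Nat) (hk : k < S.length), k < m → S[k] ≠ c := by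
  unfold firstOccB
  rw [firstFold_get? S 0 PySem.Dict.empty c]
  rw [if_neg (by simp [PySem.Dict.contains_empty])]
  have hsome : (PySem.List.index? S c).isSome := (PySem.List.index?_isSome_iff _ _).2 hc
  obtain ⟨m, hm⟩ := Option.isSome_iff_exists.1 hsome
  obtain ⟨hlt, hSm, hfirst⟩ := PySem.List.getElem_of_index?_eq_some hm
  exact ⟨m, hlt, hSm, by rw [hm]; simp, fun k hk hkm => hfirst k hkm⟩

-- pyGet? at a valid index
theorem pyGet?_valid (S : List Char) (i : Int) (h0 : 0 ≤ i) (hi : i < (S.length : Int)) :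
    PySem.List.pyGet? S i = some (S[i.toNat]'(by omega)) := by
  obtain ⟨k, rfl⟩ : ∃ k : Nat, i = (k : Int) := ⟨i.toNat, by omega⟩
  rw [PySem.List.pyGet?_natCast]
  simp only [Int.toNat_natCast]
  exact List.getElem?_eq_getElem (by omega)

theorem pyGetD_valid (S : List Char) (i : Int) (h0 : 0 ≤ i) (hi : i < (S.length : Int)) :
    PySem.List.pyGetD S i ' ' = S[i.toNat]'(by omega) :=
  PySem.List.pyGetD_eq_getElem S ' ' h0 hi

-- A's inner right-to-left scan at i finds a LATER duplicate iff Source B's last-occurrence test fires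
theorem pred_left_eq (S : List Char) (j : Int) (h0 : 0 ≤ j) (hj : j < (S.length : Int)) :
    ((PySem.List.pyRange ((S.length : Int) - 1) j (-1)).any
        (fun k => PySem.List.pyGet? S j == PySem.List.pyGet? S k))
      = decide ((lastOccB S).getD (S[j.toNat]'(by omega)) 0 > j) := by
  have hjn : j.toNat < S.length := by omega
  obtain ⟨m, hm, hSm, hget, hlast⟩ := lastOccB_spec S (S[j.toNat]'hjn) (List.getElem_mem hjn)
  have hgetD : (lastOccB S).getD (S[j.toNat]'hjn) 0 = (m : Int) :=
    PySem.Dict.getD_of_get?_eq_some _ 0 hget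
  rw [hgetD]
  rw [Bool.eq_iff_iff]
  simp only [List.any_eq_true, decide_eq_true_eq]
  constructor
  · rintro ⟨k, hkmem, hkeq⟩
    obtain ⟨hjk, hkle⟩ := PySem.List.mem_pyRange_neg_one.1 hkmem
    rw [pyGet?_valid S j h0 hj, pyGet?_valid S k (by omega) (by omega)] at hkeq
    have heq : S[j.toNat]'hjn = S[k.toNat]'(by omega) := by simpa using hkeq
    by_contra hle
    push Not at hle
    have hmk : m < k.toNat := by omega
    exact hlast k.toNat (by omega) hmk heq.symm
  · intro hjm
    refine ⟨(m : Int), PySem.List.mem_pyRange_neg_one.2 ⟨by omega, by omega⟩, ?_⟩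
    rw [pyGet?_valid S j h0 hj, pyGet?_valid S (m : Int) (by omega) (by omega)]
    simp only [Int.toNat_natCast]
    rw [hSm]
    simp

-- A's inner left-to-right scan at i finds an EARLIER duplicate iff Source B's first-occurrence test fires
theorem pred_right_eq (S : List Char) (i : Int) (h0 : 0 ≤ i) (hi : i < (S.length : Int)) :
    ((PySem.List.pyRange 0 i 1).any
        (fun j => PySem.List.pyGet? S i == PySem.List.pyGet? S j))
      = decide ((firstOccB S).getD (PySem.List.pyGetD S i ' ') 0 < i) := by
  have hin : i.toNat < S.length := by omega
  rw [pyGetD_valid S i h0 hi]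
  obtain ⟨m, hm, hSm, hget, hfirst⟩ := firstOccB_spec S (S[i.toNat]'hin) (List.getElem_mem hin)
  have hgetD : (firstOccB S).getD (S[i.toNat]'hin) 0 = (m : Int) :=
    PySem.Dict.getD_of_get?_eq_some _ 0 hget
  rw [hgetD]
  rw [Bool.eq_iff_iff]
  simp only [List.any_eq_true, decide_eq_true_eq]
  constructor
  · rintro ⟨j, hjmem, hjeq⟩
    obtain ⟨h0j, hji⟩ := PySem.List.mem_pyRange_one.1 hjmem
    rw [pyGet?_valid S i h0 hi, pyGet?_valid S j h0j (by omega)] at hjeq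
    have heq : S[i.toNat]'hin = S[j.toNat]'(by omega) := by simpa using hjeq
    by_contra hle
    push Not at hle
    have hjm : j.toNat < m := by omega
    exact hfirst j.toNat (by omega) hjm heq.symm
  · intro hmi
    refine ⟨(m : Int), PySem.List.mem_pyRange_one.2 ⟨by omega, by omega⟩, ?_⟩
    rw [pyGet?_valid S i h0 hi, pyGet?_valid S (m : Int) (by omega) (by omega)]
    simp only [Int.toNat_natCast]
    simp [hSm]

theorem step_left_eq (S : List Char) : findA_left S (S.length : Int) = findB_left S := by
  unfold findA_left findB_left
  have hlen : PySem.List.len S = (S.length : Int) := by simp [pysem]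
  rw [PySem.List.enumerate_eq_map_pyRange S ' ', hlen, List.find?_map, Option.map_map]
  have : ((fun p : Int × Char => p.1) ∘ fun j => (j, PySem.List.pyGetD S j ' ')) = id := rfl
  rw [this, Option.map_id]
  apply find?_congr_mem
  intro j hj
  obtain ⟨h0, hjlt⟩ := PySem.List.mem_pyRange_one.1 hj
  simp only [Function.comp]
  rw [pred_left_eq S j h0 hjlt]
  simp only [pyGetD_valid S j h0 hjlt]

theorem step_right_eq (S : List Char) : findA_right S (S.length : Int) = findB_right S := by
  unfold findA_right findB_right
  apply find?_congr_mem
  intro i hi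
  obtain ⟨h1, h2⟩ := PySem.List.mem_pyRange_neg_one.1 hi
  exact pred_right_eq S i (by omega) (by omega)

theorem length_removed (S : List Char) (i : Int) (h0 : 0 ≤ i) (hi : i < (S.length : Int)) :
    (PySem.List.slice S none (some i) ++ PySem.List.slice S (some (i + 1)) none).length
      = S.length - 1 := by
  rw [PySem.List.slice_to S h0, PySem.List.slice_from S (by omega)]
  simp only [List.length_append, List.length_take, List.length_drop]
  omega

theorem mod2_succ (y : Int) : PySem.Int.mod (y + 1) 2 = 1 ↔ ¬ (PySem.Int.mod y 2 = 1) := by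
  rw [PySem.Int.mod_eq_emod_of_pos (by norm_num : (0:Int) < 2),
    PySem.Int.mod_eq_emod_of_pos (by norm_num : (0:Int) < 2)]
  omega

theorem loop_eq (f : Nat) : ∀ (S : List Char) (b : Bool) (rem : Int), S.length < f →
    loopA f S (S.length : Int) b =
      ((loopB f S b rem).1,
        if PySem.Int.mod ((loopB f S b rem).2 - rem) 2 = 1 then b else !b) := by
  induction f with
  | zero => intro S b rem hf; omega
  | succ f ih =>
    intro S b rem hf
    have hscr : (if b then findB_left S else findB_right S)
        = (if b then findA_left S (S.length : Int) else findA_right S (S.length : Int)) := by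
      cases b <;> simp [step_left_eq, step_right_eq]
    rw [loopA, loopB, hscr]
    cases hfind : (if b then findA_left S (S.length : Int) else findA_right S (S.length : Int)) with
    | none =>
      simp only [remRevA, hfind]
      simp [PySem.Int.mod]
    | some i =>
      have hmem : i ∈ PySem.List.pyRange 0 (S.length : Int) 1 := by
        cases b <;> simp only [if_true, if_false, Bool.false_eq_true] at hfind
        · unfold findA_right at hfind
          have := List.mem_of_find?_eq_some hfind
          rw [PySem.List.mem_pyRange_neg_one] at this
          exact PySem.List.mem_pyRange_one.2 ⟨by omega, by omega⟩
        · unfold findA_left at hfind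
          exact List.mem_of_find?_eq_some hfind
      obtain ⟨h0, hilt⟩ := PySem.List.mem_pyRange_one.1 hmem
      simp only [remRevA, hfind]
      set S' := PySem.List.slice S none (some i) ++ PySem.List.slice S (some (i + 1)) none with hS'
      have hlen : (S'.length : Int) = (S.length : Int) - 1 := by
        rw [hS', length_removed S i h0 hilt]; omega
      simp only [if_true]
      rw [show (S.length : Int) - 1 = (S'.length : Int) from hlen.symm]
      rw [ih S' (!b) (rem + 1) (by omega)]
      have hpar : ∀ y : Int,
          (if PySem.Int.mod (y - (rem + 1)) 2 = 1 then !b else !!b)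
            = (if PySem.Int.mod (y - rem) 2 = 1 then b else !b) := by
        intro y
        have h1 : y - rem = (y - (rem + 1)) + 1 := by ring
        rw [h1]
        by_cases h : PySem.Int.mod (y - (rem + 1)) 2 = 1
        · rw [if_pos h, if_neg (fun hc => ((mod2_succ _).1 hc) h)]
        · rw [if_neg h, if_pos ((mod2_succ _).2 h), Bool.not_not]
      rw [hpar]

-- ===== VERDICT (by name: the statement is the Claim_ definition above) =====
theorem removeReverse_spec : Claim_equal_removeReverse := by
  intro S _
  unfold Spec_removeReverse removeReverse removeReverse_alt
  have h := loop_eq (S.toList.length + 1) S.toList true 0 (by omega)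
  simp only [h, sub_zero]
  by_cases hm : PySem.Int.mod (loopB (S.toList.length + 1) S.toList true 0).2 2 = 1 <;> simp
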